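-- pv_equiv track=rewrite | github.com/hyeonjun/AlgorithmTest | ProGrammers/Lv2/level_2_Square.py | solution
-- ===== SOURCE A (Python) =====
-- def solution(w,h):
--     def gcd(n,m):
--         while m > 0:
--             n, m = m, n%m
--         return n
--     if h > w:
--         w, h = h, w
--     gN = gcd(w, h)
--     return (w * h) - (w + h - gN)
-- ===== SOURCE B (Python) =====
-- def solution(w, h):
--     def gcd(n, m):
--         return n if m <= 0 else gcd(m, n % m)
--     return w * h - (w + h - gcd(max(w, h), min(w, h)))
-- ===== Notes on version B (the rewrite author's own statement) =====
-- stated objective: simpler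
-- what changed: B replaces A's conditional in-place swap plus iterative while-loop gcd by a one-expression closed form over max/min and a recursive Euclidean gcd helper.
import Mathlib
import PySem

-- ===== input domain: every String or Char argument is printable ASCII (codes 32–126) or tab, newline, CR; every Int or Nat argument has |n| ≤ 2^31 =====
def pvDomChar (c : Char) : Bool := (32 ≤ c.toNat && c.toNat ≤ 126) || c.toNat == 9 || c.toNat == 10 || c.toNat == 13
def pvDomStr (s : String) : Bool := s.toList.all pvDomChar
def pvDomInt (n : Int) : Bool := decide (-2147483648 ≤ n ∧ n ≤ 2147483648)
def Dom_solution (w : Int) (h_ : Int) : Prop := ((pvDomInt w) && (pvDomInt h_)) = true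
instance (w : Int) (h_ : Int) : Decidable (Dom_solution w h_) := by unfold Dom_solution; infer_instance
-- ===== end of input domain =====

-- B replaces A's conditional swap + iterative gcd loop by a one-expression form over
-- max/min with a recursive Euclidean gcd (objective: simpler).


-- ===== PORT A =====
-- A's inner 'while m > 0: n, m = m, n % m' as the obvious tail recursion on the same state
def gcdA (n m : Int) : Int :=
  if h : 0 < m then gcdA m (PySem.Int.mod n m) else n
termination_by m.toNat
decreasing_by
  have h1 := PySem.Int.mod_nonneg n h
  have h2 := PySem.Int.mod_lt n h
  omega

def solution (w : Int) (h_ : Int) : Int :=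
  let p := if h_ > w then (h_, w) else (w, h_)
  let gN := gcdA p.1 p.2
  p.1 * p.2 - (p.1 + p.2 - gN)

-- ===== PORT B =====
-- B's recursive 'gcd(n, m) = n if m <= 0 else gcd(m, n % m)'
def gcdB (n m : Int) : Int :=
  if h : m ≤ 0 then n else gcdB m (PySem.Int.mod n m)
termination_by m.toNat
decreasing_by
  have hm : 0 < m := by omega
  have h1 := PySem.Int.mod_nonneg n hm
  have h2 := PySem.Int.mod_lt n hm
  omega

def solution_alt (w : Int) (h_ : Int) : Int :=
  w * h_ - (w + h_ - gcdB (max w h_) (min w h_))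

-- ===== PRECONDITION & SPEC =====
def Spec_solution (w : Int) (h_ : Int) (out : Int) : Prop := out = solution_alt w h_
instance (w : Int) (h_ : Int) (out : Int) : Decidable (Spec_solution w h_ out) := by unfold Spec_solution; infer_instance

-- ===== CLAIM (what is proved, stated in full; the proofs are below) =====
def Claim_equal_solution : Prop := ∀ (w : Int) (h_ : Int), Dom_solution w h_ → Spec_solution w h_ (solution w h_)

-- ===== LEMMAS AND PROOFS =====

-- the two gcd helpers take identical steps: A recurses while 0 < m, B while ¬ m ≤ 0
theorem gcdA_eq_gcdB : ∀ (k : Nat) (n m : Int), m.toNat ≤ k → gcdA n m = gcdB n m := by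
  intro k
  induction k with
  | zero =>
    intro n m hk
    rw [gcdA, gcdB]
    simp only [show ¬ (0 : Int) < m by omega, show m ≤ 0 by omega, dite_false, dite_true]
  | succ k ih =>
    intro n m hk
    rw [gcdA, gcdB]
    by_cases hm : 0 < m
    · simp only [hm, show ¬ m ≤ 0 by omega, dite_true, dite_false]
      have h1 := PySem.Int.mod_nonneg n hm
      have h2 := PySem.Int.mod_lt n hm
      exact ih m (PySem.Int.mod n m) (by omega)
    · simp only [hm, show m ≤ 0 by omega, dite_false, dite_true]

-- ===== VERDICT (by name: the statement is the Claim_ definition above) =====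
theorem solution_spec : Claim_equal_solution := by
  intro w h_ _
  unfold Spec_solution solution solution_alt
  by_cases hcmp : h_ > w
  · have hmax : max w h_ = h_ := by omega
    have hmin : min w h_ = w := by omega
    simp only [hcmp, if_true, hmax, hmin, gcdA_eq_gcdB w.toNat h_ w (le_refl _)]
    ring
  · have hmax : max w h_ = w := by omega
    have hmin : min w h_ = h_ := by omega
    simp only [hcmp, if_false, hmax, hmin, gcdA_eq_gcdB h_.toNat w h_ (le_refl _)]
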